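-- pv_equiv track=rewrite | github.com/marinamirand/ATP2022 | TPC6/obras.py | titPorCompositor
-- ===== SOURCE A (Python) =====
-- def titPorCompositor (obras):
--     res = {}
--     for nome, _, _, _, compositor, *_ in obras:
--         if compositor in res.keys():
--             res [compositor].append(nome)
--         else:
--             res [compositor] = [nome]
--     return res
-- ===== SOURCE B (Python) =====
-- def titPorCompositor(obras):
--     # Two-phase: collect composers in first-occurrence order, then gather each one's titles by scanning.
--     comps = []
--     for nome, _, _, _, compositor, *_ in obras:
--         if compositor not in comps:
--             comps.append(compositor)
--     return {c: [o[0] for o in obras if o[4] == c] for c in comps}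
-- ===== Notes on version B (the rewrite author's own statement) =====
-- stated objective: alternative
-- what changed: Replaces the single-pass dict accumulation with a two-phase plan: first dedup the composer column in first-occurrence order, then build each composer's title list by a comprehension scanning obras.
import Mathlib
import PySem

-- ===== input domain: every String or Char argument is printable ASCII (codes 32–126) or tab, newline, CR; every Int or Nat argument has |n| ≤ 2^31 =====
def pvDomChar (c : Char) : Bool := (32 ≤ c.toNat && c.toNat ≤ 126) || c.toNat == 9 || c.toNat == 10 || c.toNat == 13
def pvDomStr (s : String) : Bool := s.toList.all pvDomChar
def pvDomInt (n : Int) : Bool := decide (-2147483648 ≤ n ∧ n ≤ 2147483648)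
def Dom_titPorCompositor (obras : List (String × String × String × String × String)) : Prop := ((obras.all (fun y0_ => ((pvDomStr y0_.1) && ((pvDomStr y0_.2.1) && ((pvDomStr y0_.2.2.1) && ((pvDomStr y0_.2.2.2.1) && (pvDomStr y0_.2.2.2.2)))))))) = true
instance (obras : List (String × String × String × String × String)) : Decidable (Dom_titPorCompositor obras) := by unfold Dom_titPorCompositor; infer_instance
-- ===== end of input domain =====

-- B groups titles by composer in two phases (dedup the composer column, then gather per composer)
-- instead of A's single-pass dict accumulation; same result, not faster.

-- ===== PORT A =====
-- A: one pass over obras, appending each title to its composer's dict entry (fresh singleton on first sight).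
def titPorCompositor (obras : List (String × String × String × String × String)) : List (String × List String) :=
  (obras.foldl
    (fun res row =>
      if res.contains row.2.2.2.2 then
        res.modify row.2.2.2.2 [] (fun l => l ++ [row.1])
      else
        res.insert row.2.2.2.2 [row.1])
    (PySem.Dict.empty : PySem.Dict String (List String))).items

-- ===== PORT B =====
-- B: collect the distinct composers in first-occurrence order, then one comprehension per composer.
def titPorCompositor_alt (obras : List (String × String × String × String × String)) : List (String × List String) :=
  let comps := obras.foldl
    (fun acc row => if PySem.Set.contains acc row.2.2.2.2 then acc else acc ++ [row.2.2.2.2])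
    ([] : List String)
  comps.map (fun c => (c, ((obras.filter (fun o => o.2.2.2.2 == c)).map (fun o => o.1))))

-- ===== PRECONDITION & SPEC =====
def Spec_titPorCompositor (obras : List (String × String × String × String × String)) (out : List (String × List String)) : Prop := out = titPorCompositor_alt obras
instance (obras : List (String × String × String × String × String)) (out : List (String × List String)) : Decidable (Spec_titPorCompositor obras out) := by unfold Spec_titPorCompositor; infer_instance

-- ===== CLAIM (what is proved, stated in full; the proofs are below) =====
def Claim_equal_titPorCompositor : Prop := ∀ (obras : List (String × String × String × String × String)), Dom_titPorCompositor obras → Spec_titPorCompositor obras (titPorCompositor obras)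

-- ===== LEMMAS AND PROOFS =====

-- A's step (membership test, then append-or-create) is exactly Dict.modify with default [].
lemma stepA_eq_modify (d : PySem.Dict String (List String)) (row : String × String × String × String × String) :
    (if d.contains row.2.2.2.2 then d.modify row.2.2.2.2 [] (fun l => l ++ [row.1])
     else d.insert row.2.2.2.2 [row.1]) = d.modify row.2.2.2.2 [] (fun l => l ++ [row.1]) := by
  by_cases h : d.contains row.2.2.2.2
  · simp [h]
  · rw [if_neg (by simp [h])]
    simp [PySem.Dict.modify, PySem.Dict.insert, h,
      PySem.Dict.getD_of_not_contains _ _ (Bool.eq_false_iff.mpr h)]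

-- A's whole loop is a modify-fold over the (composer, title) pairs.
lemma foldA_eq (obras : List (String × String × String × String × String)) :
    titPorCompositor obras =
    ((obras.map (fun r => (r.2.2.2.2, r.1))).foldl
      (fun (d : PySem.Dict String (List String)) p => d.modify p.1 [] (fun l => l ++ [p.2]))
      PySem.Dict.empty).items := by
  unfold titPorCompositor
  rw [List.foldl_map]
  have hstep : (fun (res : PySem.Dict String (List String)) (row : String × String × String × String × String) =>
      if res.contains row.2.2.2.2 then res.modify row.2.2.2.2 [] (fun l => l ++ [row.1])
      else res.insert row.2.2.2.2 [row.1])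
    = (fun res row => res.modify row.2.2.2.2 [] (fun l => l ++ [row.1])) := by
    funext d row; exact stepA_eq_modify d row
  rw [hstep]

lemma keys_eq (obras : List (String × String × String × String × String)) :
    ((obras.map (fun r => (r.2.2.2.2, r.1))).foldl
      (fun (d : PySem.Dict String (List String)) p => d.modify p.1 [] (fun l => l ++ [p.2]))
      PySem.Dict.empty).keys
    = PySem.Set.ofList (obras.map (fun r => r.2.2.2.2)) := by
  rw [PySem.Dict.keys_foldl_modify_key]
  simp [PySem.Dict.keys_empty, PySem.Set.update_nil_left, List.map_map, Function.comp_def]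

lemma getD_eq (obras : List (String × String × String × String × String)) (c : String) :
    ((obras.map (fun r => (r.2.2.2.2, r.1))).foldl
      (fun (d : PySem.Dict String (List String)) p => d.modify p.1 [] (fun l => l ++ [p.2]))
      PySem.Dict.empty).getD c []
    = (obras.filter (fun o => o.2.2.2.2 == c)).map (fun o => o.1) := by
  rw [PySem.Dict.getD_foldl_modify_append]
  simp [List.filter_map, List.map_map, Function.comp_def]

-- B's composer-collecting loop is the ordered dedup of the composer column.
lemma comps_eq (obras : List (String × String × String × String × String)) :
    (obras.foldl (fun acc row => if PySem.Set.contains acc row.2.2.2.2 then acc else acc ++ [row.2.2.2.2]) ([] : List String))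
    = PySem.Set.ofList (obras.map (fun r => r.2.2.2.2)) := by
  rw [← PySem.Set.update_nil_left, PySem.Set.update_map_eq_foldl_add]
  rfl

-- ===== VERDICT (by name: the statement is the Claim_ definition above) =====
theorem titPorCompositor_spec : Claim_equal_titPorCompositor := by
  intro obras _
  unfold Spec_titPorCompositor titPorCompositor_alt
  rw [foldA_eq, comps_eq]
  rw [PySem.Dict.items_eq_map_keys _
    (PySem.Dict.nodup_keys_foldl_modify_key _ _ _ _ _ PySem.Dict.nodup_keys_empty) ([] : List String)]
  rw [keys_eq]
  congr 1
  funext c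
  rw [getD_eq]
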